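-- pv_equiv track=rewrite | github.com/Gokul-raaj-5999/Programming_Coding | GeeksforGeeks_coding/count sorted rows.py | sortedCount
-- ===== SOURCE A (Python) =====
-- def sortedCount(N,M,Mat):
--     def call(lst):
--         i = 0
--         a = 0
--         b = 0
--         while i < len(lst)-1:
--             if a == 0 and b == 0:
--                 if lst[i] < lst[i+1]:
--                     a = 1
--                     b = 0
--                 elif lst[i] > lst[i+1]:
--                     a = 0
--                     b = 1
--                 else:
--                     return 0
--             elif a == 1:
--                 if lst[i] > lst[i+1] or lst[i] == lst[i+1]:
--                     return 0
--                 else: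
--                     i += 1
--             elif b ==1:
--                 if lst[i] < lst[i+1] or lst[i] == lst[i+1]:
--                     return 0
--                 else:
--                     i += 1
--
--         return 1
--
--     count =0
--     for lst in Mat:
--         if call(lst):
--             count += 1
--
--     return (count)
-- ===== SOURCE B (Python) =====
-- def sortedCount(N, M, Mat):
--     def is_sorted(lst):
--         pairs = list(zip(lst, lst[1:]))
--         asc = all(x < y for x, y in pairs)
--         desc = all(x > y for x, y in pairs)
--         return asc or desc
--     return sum(1 for lst in Mat if is_sorted(lst))
-- ===== Notes on version B (the rewrite author's own statement) =====
-- stated objective: simpler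
-- what changed: Replaces the index-based while-loop state machine (flags a/b tracking the detected direction) with two stateless monotonicity predicates over adjacent pairs (zip with the tail) and a count over rows.
import Mathlib
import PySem

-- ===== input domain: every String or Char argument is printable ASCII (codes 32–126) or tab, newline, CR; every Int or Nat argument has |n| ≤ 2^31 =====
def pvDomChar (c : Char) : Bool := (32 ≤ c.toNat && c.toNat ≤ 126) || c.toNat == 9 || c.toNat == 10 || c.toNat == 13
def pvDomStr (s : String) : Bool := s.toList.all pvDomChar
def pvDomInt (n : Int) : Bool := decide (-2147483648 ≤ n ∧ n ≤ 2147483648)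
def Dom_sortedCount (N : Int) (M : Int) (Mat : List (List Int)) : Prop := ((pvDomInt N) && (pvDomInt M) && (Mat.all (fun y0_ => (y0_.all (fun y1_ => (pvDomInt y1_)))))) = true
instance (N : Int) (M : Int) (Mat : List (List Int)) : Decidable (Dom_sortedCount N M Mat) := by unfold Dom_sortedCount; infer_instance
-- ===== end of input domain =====

-- B replaces A's flag-based while-loop state machine with two stateless adjacent-pair
-- monotonicity checks per row (objective: simpler). Return-value equivalence only; no mutation.

-- ===== PORT A =====
-- the while loop of A's inner `call`, state (i, a, b); branches in A's order
def sortedCountGo (lst : List Int) (i a b : Int) : Int :=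
  if _h : i < (lst.length : Int) - 1 then
    match _hx : PySem.List.pyGet? lst i, _hy : PySem.List.pyGet? lst (i + 1) with
    | some x, some y =>
      if a = 0 ∧ b = 0 then
        if x < y then sortedCountGo lst i 1 0
        else if x > y then sortedCountGo lst i 0 1
        else 0
      else if a = 1 then
        if x > y ∨ x = y then 0 else sortedCountGo lst (i + 1) a b
      else if b = 1 then
        if x < y ∨ x = y then 0 else sortedCountGo lst (i + 1) a b
      else 0  -- unreachable: a, b ∈ {0, 1} and never both cleared after the first step
    | _, _ => 0  -- unreachable IndexError arm: the guard keeps both indices in range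
  else 1
termination_by (((lst.length : Int) - 1 - i).toNat) * 2 + (if a = 0 ∧ b = 0 then 1 else 0)
decreasing_by all_goals simp_all

def sortedCountCall (lst : List Int) : Int := sortedCountGo lst 0 0 0

def sortedCount (N : Int) (M : Int) (Mat : List (List Int)) : Int :=
  Mat.foldl (fun count lst => if sortedCountCall lst ≠ 0 then count + 1 else count) 0

-- ===== PORT B =====
def sortedCountIsSorted (lst : List Int) : Bool :=
  let pairs := lst.zip (PySem.List.slice lst (some 1) none)
  let asc := pairs.all (fun p => decide (p.1 < p.2))
  let desc := pairs.all (fun p => decide (p.1 > p.2))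
  asc || desc

def sortedCount_alt (N : Int) (M : Int) (Mat : List (List Int)) : Int :=
  ((Mat.countP (fun lst => sortedCountIsSorted lst) : Nat) : Int)

-- ===== PRECONDITION & SPEC =====
def Spec_sortedCount (N : Int) (M : Int) (Mat : List (List Int)) (out : Int) : Prop := out = sortedCount_alt N M Mat
instance (N : Int) (M : Int) (Mat : List (List Int)) (out : Int) : Decidable (Spec_sortedCount N M Mat out) := by unfold Spec_sortedCount; infer_instance

-- ===== CLAIM (what is proved, stated in full; the proofs are below) =====
def Claim_equal_sortedCount : Prop := ∀ (N : Int) (M : Int) (Mat : List (List Int)), Dom_sortedCount N M Mat → Spec_sortedCount N M Mat (sortedCount N M Mat)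

-- ===== LEMMAS AND PROOFS =====

-- the zip of the two suffixes unfolds one pair while both indices are in range
lemma zip_drop_cons (lst : List Int) (i : Nat) (h : i + 1 < lst.length) :
    (lst.drop i).zip (lst.drop (i + 1)) =
      (lst[i], lst[i + 1]) :: (lst.drop (i + 1)).zip (lst.drop (i + 1 + 1)) := by
  conv_lhs => rw [List.drop_eq_getElem_cons (show i < lst.length by omega),
    List.drop_eq_getElem_cons h]
  rw [List.zip_cons_cons]
  rw [← List.drop_eq_getElem_cons h]

-- once the ascending flag is set, the loop checks exactly "strictly ascending from i on"
lemma goAsc (lst : List Int) (i : Nat) :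
    sortedCountGo lst i 1 0 =
      if ((lst.drop i).zip (lst.drop (i + 1))).all (fun p => decide (p.1 < p.2)) then 1 else 0 := by
  rw [sortedCountGo]
  by_cases hlt : (i : Int) < (lst.length : Int) - 1
  · have h1 : i + 1 < lst.length := by omega
    have hx : PySem.List.pyGet? lst (i : Int) = some lst[i] :=
      PySem.List.pyGet?_ofNat lst i (by omega)
    have hy : PySem.List.pyGet? lst ((i : Int) + 1) = some lst[i + 1] := by
      have : ((i : Int) + 1) = ((i + 1 : Nat) : Int) := by push_cast; ring
      rw [this]; exact PySem.List.pyGet?_ofNat lst (i + 1) h1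
    rw [dif_pos hlt]
    rw [zip_drop_cons lst i h1, List.all_cons]
    split
    · rename_i x y hx' hy'
      rw [hx] at hx'; rw [hy] at hy'
      obtain rfl : x = lst[i] := by injection hx'; omega
      obtain rfl : y = lst[i + 1] := by injection hy'; omega
      have hone : ¬ ((1 : Int) = 0 ∧ (0 : Int) = 0) := by simp
      rw [if_neg hone, if_pos rfl]
      by_cases hxy : lst[i] < lst[i + 1]
      · have : ¬ (lst[i] > lst[i + 1] ∨ lst[i] = lst[i + 1]) := by omega
        rw [if_neg this]
        have hc : ((i : Int) + 1) = ((i + 1 : Nat) : Int) := by push_cast; ring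
        rw [hc, goAsc lst (i + 1)]
        have hd : decide (lst[i] < lst[i + 1]) = true := by simp [hxy]
        rw [hd, Bool.true_and]
      · have : (lst[i] > lst[i + 1] ∨ lst[i] = lst[i + 1]) := by omega
        rw [if_pos this]
        have hd : decide (lst[i] < lst[i + 1]) = false := by simp [hxy]
        rw [hd, Bool.false_and]
        simp
    · rename_i habs; exact absurd (habs lst[i] lst[i + 1] hx hy) (by simp)
  · rw [dif_neg hlt]
    have : lst.drop (i + 1) = [] := List.drop_eq_nil_of_le (by omega)
    rw [this, List.zip_nil_right]
    simp
termination_by lst.length - i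
decreasing_by omega

lemma goDesc (lst : List Int) (i : Nat) :
    sortedCountGo lst i 0 1 =
      if ((lst.drop i).zip (lst.drop (i + 1))).all (fun p => decide (p.1 > p.2)) then 1 else 0 := by
  rw [sortedCountGo]
  by_cases hlt : (i : Int) < (lst.length : Int) - 1
  · have h1 : i + 1 < lst.length := by omega
    have hx : PySem.List.pyGet? lst (i : Int) = some lst[i] :=
      PySem.List.pyGet?_ofNat lst i (by omega)
    have hy : PySem.List.pyGet? lst ((i : Int) + 1) = some lst[i + 1] := by
      have : ((i : Int) + 1) = ((i + 1 : Nat) : Int) := by push_cast; ring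
      rw [this]; exact PySem.List.pyGet?_ofNat lst (i + 1) h1
    rw [dif_pos hlt]
    rw [zip_drop_cons lst i h1, List.all_cons]
    split
    · rename_i x y hx' hy'
      rw [hx] at hx'; rw [hy] at hy'
      obtain rfl : x = lst[i] := by injection hx'; omega
      obtain rfl : y = lst[i + 1] := by injection hy'; omega
      have hone : ¬ ((0 : Int) = 0 ∧ (1 : Int) = 0) := by simp
      have hnota : ¬ ((0 : Int) = 1) := by simp
      rw [if_neg hone, if_neg hnota, if_pos rfl]
      by_cases hxy : lst[i] > lst[i + 1]
      · have : ¬ (lst[i] < lst[i + 1] ∨ lst[i] = lst[i + 1]) := by omega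
        rw [if_neg this]
        have hc : ((i : Int) + 1) = ((i + 1 : Nat) : Int) := by push_cast; ring
        rw [hc, goDesc lst (i + 1)]
        have hd : decide (lst[i] > lst[i + 1]) = true := by simp [hxy]
        rw [hd, Bool.true_and]
      · have : (lst[i] < lst[i + 1] ∨ lst[i] = lst[i + 1]) := by omega
        rw [if_pos this]
        have hd : decide (lst[i] > lst[i + 1]) = false := by simp [hxy]
        rw [hd, Bool.false_and]
        simp
    · rename_i habs; exact absurd (habs lst[i] lst[i + 1] hx hy) (by simp)
  · rw [dif_neg hlt]
    have : lst.drop (i + 1) = [] := List.drop_eq_nil_of_le (by omega)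
    rw [this, List.zip_nil_right]
    simp
termination_by lst.length - i
decreasing_by omega

lemma call_eq (lst : List Int) :
    sortedCountCall lst = if sortedCountIsSorted lst then 1 else 0 := by
  match lst with
  | [] =>
    rw [sortedCountCall, sortedCountGo, dif_neg (by norm_num)]
    simp [sortedCountIsSorted]
  | [x] =>
    rw [sortedCountCall, sortedCountGo, dif_neg (by norm_num)]
    simp [sortedCountIsSorted, PySem.List.slice_from_one]
  | x :: y :: rest =>
    have hA := goAsc (x :: y :: rest) 0
    have hD := goDesc (x :: y :: rest) 0
    simp only [Nat.cast_zero, zero_add, List.drop_zero, List.drop_one, List.tail_cons,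
      List.zip_cons_cons, List.all_cons] at hA hD
    have h0 : PySem.List.pyGet? (x :: y :: rest) (0 : Int) = some x :=
      PySem.List.pyGet?_zero_cons x (y :: rest)
    have h1' : PySem.List.pyGet? (x :: y :: rest) ((0 : Int) + 1) = some y := by
      norm_num
    rw [sortedCountCall, sortedCountGo]
    rw [dif_pos (by simp)]
    split
    · rename_i x0 y0 hx' hy'
      rw [h0] at hx'; rw [h1'] at hy'
      have hx2 : x0 = x := by injection hx'; omega
      have hy2 : y0 = y := by injection hy'; omega
      rw [if_pos ⟨rfl, rfl⟩, hx2, hy2]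
      simp only [sortedCountIsSorted, PySem.List.slice_from_one, List.tail_cons,
        List.zip_cons_cons, List.all_cons]
      rcases lt_trichotomy x y with hxy | hxy | hxy
      · rw [if_pos hxy, hA]
        have ht : decide (x < y) = true := by simp [hxy]
        have hf : decide (x > y) = false := by simp; omega
        rw [ht, hf, Bool.true_and, Bool.false_and, Bool.or_false]
      · subst hxy
        rw [if_neg (lt_irrefl x), if_neg (lt_irrefl x)]
        simp
      · rw [if_neg (by omega), if_pos (by omega), hD]
        have ht : decide (x > y) = true := by simp [hxy]
        have hf : decide (x < y) = false := by simp; omega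
        rw [ht, hf, Bool.true_and, Bool.false_and, Bool.false_or]
    · rename_i habs; exact absurd (habs x y h0 h1') (by simp)

lemma fold_eq (Mat : List (List Int)) (c : Int) :
    Mat.foldl (fun count lst => if sortedCountCall lst ≠ 0 then count + 1 else count) c =
      c + ((Mat.countP (fun lst => sortedCountIsSorted lst) : Nat) : Int) := by
  induction Mat generalizing c with
  | nil => simp
  | cons hd tl ih =>
    simp only [List.foldl_cons, List.countP_cons, ih, call_eq hd]
    by_cases h : sortedCountIsSorted hd <;> simp [h] <;> ring

-- ===== VERDICT (by name: the statement is the Claim_ definition above) =====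
theorem sortedCount_spec : Claim_equal_sortedCount := by
  intro N M Mat _
  show _ = _
  unfold sortedCount sortedCount_alt
  rw [fold_eq]; ring
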